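-- pv_equiv track=rewrite | github.com/pypi-data/pypi-mirror-383 | packages/exonware-xwnode/exonware_xwnode-0.0.1.22.tar.gz/exonware_xwnode-0.0.1.22/src/exonware/xwnode/queries/strategies/graphql.py | _calculate_query_depth
-- ===== SOURCE A (Python) =====
-- def _calculate_query_depth(query: str) -> int:
--     """Calculate query nesting depth."""
--     depth = 0
--     max_depth = 0
--
--     for char in query:
--         if char == '{':
--             depth += 1
--             max_depth = max(max_depth, depth)
--         elif char == '}':
--             depth -= 1
--
--     return max_depth
-- ===== SOURCE B (Python) =====
-- def _calculate_query_depth(query: str) -> int: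
--     """Calculate query nesting depth."""
--     def solve(lo: int, hi: int):
--         # (total balance, max prefix balance incl. the empty prefix) of query[lo:hi]
--         if lo == hi:
--             return (0, 0)
--         if hi - lo == 1:
--             d = 1 if query[lo] == '{' else (-1 if query[lo] == '}' else 0)
--             return (d, max(0, d))
--         mid = (lo + hi) // 2
--         t1, b1 = solve(lo, mid)
--         t2, b2 = solve(mid, hi)
--         return (t1 + t2, max(b1, t1 + b2))
--     return solve(0, len(query))[1]
-- ===== Notes on version B (the rewrite author's own statement) =====
-- stated objective: alternative
-- what changed: B replaces A's sequential depth/max_depth loop with a divide-and-conquer: each half of the string is summarised by (total balance, max prefix balance) and the summaries are combined with (t1+t2, max(b1, t1+b2)).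
import Mathlib
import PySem

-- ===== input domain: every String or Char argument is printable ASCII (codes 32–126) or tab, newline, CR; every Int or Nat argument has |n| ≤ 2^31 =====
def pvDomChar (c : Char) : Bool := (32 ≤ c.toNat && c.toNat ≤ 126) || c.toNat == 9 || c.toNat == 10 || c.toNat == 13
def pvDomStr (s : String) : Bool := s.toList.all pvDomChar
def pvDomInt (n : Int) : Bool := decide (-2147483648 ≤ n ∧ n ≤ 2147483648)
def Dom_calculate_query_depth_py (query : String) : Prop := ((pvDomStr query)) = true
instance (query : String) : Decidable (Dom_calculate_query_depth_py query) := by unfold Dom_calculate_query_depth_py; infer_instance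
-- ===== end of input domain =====

-- B computes the max brace depth by divide-and-conquer on half-splits (combining (total, max-prefix) summaries) instead of A's sequential depth/max_depth loop.


-- ===== PORT A =====
-- A's loop: state (depth, max_depth), branches in source order.
def pvGoA : List Char → Int → Int → Int
  | [], _, maxDepth => maxDepth
  | c :: cs, depth, maxDepth =>
    if c = '{' then pvGoA cs (depth + 1) (max maxDepth (depth + 1))
    else if c = '}' then pvGoA cs (depth - 1) maxDepth
    else pvGoA cs depth maxDepth

def calculate_query_depth_py (query : String) : Int :=
  pvGoA query.toList 0 0

-- ===== PORT B =====
-- delta of one char: 1 if '{' else -1 if '}' else 0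
def pvDeltaB (c : Char) : Int := if c = '{' then 1 else if c = '}' then -1 else 0

-- B's solve on a slice, here carried as the list of its chars: returns
-- (total balance, max prefix balance including the empty prefix).
def pvSolve : List Char → Int × Int
  | [] => (0, 0)
  | [c] => (pvDeltaB c, max 0 (pvDeltaB c))
  | a :: b :: rest =>
    let n := (a :: b :: rest).length / 2
    let p1 := pvSolve ((a :: b :: rest).take n)
    let p2 := pvSolve ((a :: b :: rest).drop n)
    (p1.1 + p2.1, max p1.2 (p1.1 + p2.2))
termination_by l => l.length
decreasing_by
  · simp [List.length_take]; omega
  · simp [List.length_drop]; omega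

def calculate_query_depth_py_alt (query : String) : Int :=
  (pvSolve query.toList).2

-- ===== PRECONDITION & SPEC =====
def Spec_calculate_query_depth_py (query : String) (out : Int) : Prop := out = calculate_query_depth_py_alt query
instance (query : String) (out : Int) : Decidable (Spec_calculate_query_depth_py query out) := by unfold Spec_calculate_query_depth_py; infer_instance

-- ===== CLAIM (what is proved, stated in full; the proofs are below) =====
def Claim_equal_calculate_query_depth_py : Prop := ∀ (query : String), Dom_calculate_query_depth_py query → Spec_calculate_query_depth_py query (calculate_query_depth_py query)

-- ===== LEMMAS AND PROOFS =====

-- reference semantics: total balance and max prefix balance (incl. empty prefix)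
def pvSum (l : List Char) : Int := (l.map pvDeltaB).sum
def pvMps : List Char → Int
  | [] => 0
  | c :: cs => max 0 (pvDeltaB c + pvMps cs)

theorem pvMps_nonneg (l : List Char) : 0 ≤ pvMps l := by
  cases l <;> simp [pvMps]

theorem pvSum_append (u v : List Char) : pvSum (u ++ v) = pvSum u + pvSum v := by
  simp [pvSum]

theorem pvMps_append (u v : List Char) :
    pvMps (u ++ v) = max (pvMps u) (pvSum u + pvMps v) := by
  induction u with
  | nil => have := pvMps_nonneg v; simp [pvMps, pvSum]; omega
  | cons c cs ih => simp [pvMps, pvSum, ih] at *; omega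

theorem pvSolve_eq (l : List Char) : pvSolve l = (pvSum l, pvMps l) := by
  suffices H : ∀ N (l : List Char), l.length ≤ N → pvSolve l = (pvSum l, pvMps l) from
    H l.length l le_rfl
  intro N
  induction N with
  | zero =>
    intro l h
    match l with
    | [] => simp [pvSolve, pvSum, pvMps]
  | succ N ih =>
    intro l h
    match l with
    | [] => simp [pvSolve, pvSum, pvMps]
    | [c] => simp [pvSolve, pvSum, pvMps]
    | a :: b :: rest =>
      rw [pvSolve]
      have hlen : (a :: b :: rest).length = rest.length + 2 := by simp
      have h1 : ((a :: b :: rest).take ((a :: b :: rest).length / 2)).length ≤ N := by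
        simp [List.length_take]; omega
      have h2 : ((a :: b :: rest).drop ((a :: b :: rest).length / 2)).length ≤ N := by
        simp [List.length_drop] at h ⊢; omega
      simp only [ih _ h1, ih _ h2]
      have hm := pvMps_append ((a :: b :: rest).take ((a :: b :: rest).length / 2))
        ((a :: b :: rest).drop ((a :: b :: rest).length / 2))
      have hs := pvSum_append ((a :: b :: rest).take ((a :: b :: rest).length / 2))
        ((a :: b :: rest).drop ((a :: b :: rest).length / 2))
      rw [List.take_append_drop] at hm hs
      exact Prod.ext hs.symm hm.symm

theorem pvGoA_eq (l : List Char) : ∀ d m : Int, d ≤ m →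
    pvGoA l d m = max m (d + pvMps l) := by
  induction l with
  | nil => intro d m h; simp [pvGoA, pvMps]; omega
  | cons c cs ih =>
    intro d m h
    have hn := pvMps_nonneg cs
    by_cases h1 : c = '{'
    · rw [pvGoA, if_pos h1, ih (d+1) _ (le_max_right _ _)]
      simp [pvMps, pvDeltaB, h1]; omega
    · by_cases h2 : c = '}'
      · rw [pvGoA, if_neg h1, if_pos h2, ih (d-1) m (by omega)]
        simp [pvMps, pvDeltaB, h2]; omega
      · rw [pvGoA, if_neg h1, if_neg h2, ih d m h]
        simp only [pvMps, pvDeltaB, if_neg h1, if_neg h2]; omega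

-- ===== VERDICT (by name: the statement is the Claim_ definition above) =====
theorem calculate_query_depth_py_spec : Claim_equal_calculate_query_depth_py := by
  intro query _
  show calculate_query_depth_py query = calculate_query_depth_py_alt query
  unfold calculate_query_depth_py calculate_query_depth_py_alt
  rw [pvSolve_eq, pvGoA_eq _ 0 0 le_rfl]
  have := pvMps_nonneg query.toList
  simp; omega
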